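-- pv_equiv track=rewrite | github.com/kengiroy2-g/kenobase | scripts/jackpot_timing_indicator.py | calculate_near_miss_score
-- ===== SOURCE A (Python) =====
-- def calculate_near_miss_score(recent_hits):
--     """
--     Score basierend auf Near-Miss Events (5+, 6+ Treffer).
--     """
--     if len(recent_hits) < 5:
--         return 50
--
--     h5_count = sum(1 for h in recent_hits if h >= 5)
--     h6_count = sum(1 for h in recent_hits if h >= 6)
--     h7_count = sum(1 for h in recent_hits if h >= 7)
--
--     score = 30  # Basis
--
--     # Near-Miss Bonus
--     score += h5_count * 10
--     score += h6_count * 15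
--     score += h7_count * 20
--
--     return min(95, score)
-- ===== SOURCE B (Python) =====
-- def calculate_near_miss_score(recent_hits):
--     if len(recent_hits) < 5:
--         return 50
--     score = 30
--     for h in recent_hits:
--         if h >= 7:
--             score += 45
--         elif h >= 6:
--             score += 25
--         elif h >= 5:
--             score += 10
--     return min(95, score)
-- ===== Notes on version B (the rewrite author's own statement) =====
-- stated objective: faster
-- what changed: Replaced the three separate filter-and-count passes (and the count-times-weight arithmetic) with one accumulation loop that adds each element's cumulative threshold weight (45/25/10) directly to the score.
import Mathlib
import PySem

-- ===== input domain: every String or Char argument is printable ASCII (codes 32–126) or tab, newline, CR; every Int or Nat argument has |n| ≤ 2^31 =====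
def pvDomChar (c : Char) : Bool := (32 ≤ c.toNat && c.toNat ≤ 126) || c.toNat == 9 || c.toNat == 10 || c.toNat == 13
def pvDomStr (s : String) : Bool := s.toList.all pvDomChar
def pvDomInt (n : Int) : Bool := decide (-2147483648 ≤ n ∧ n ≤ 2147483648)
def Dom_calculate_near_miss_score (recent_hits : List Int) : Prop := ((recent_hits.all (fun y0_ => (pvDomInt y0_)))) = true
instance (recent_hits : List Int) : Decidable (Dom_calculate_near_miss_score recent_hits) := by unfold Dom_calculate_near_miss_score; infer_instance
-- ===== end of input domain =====

-- B fuses A's three filter-and-count passes into one weighted accumulation loop (objective: simpler, same result).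

-- ===== PORT A =====
def calculate_near_miss_score (recent_hits : List Int) : Int :=
  if recent_hits.length < 5 then 50
  else
    let h5_count : Int := recent_hits.foldl (fun a h => if h ≥ 5 then a + 1 else a) 0
    let h6_count : Int := recent_hits.foldl (fun a h => if h ≥ 6 then a + 1 else a) 0
    let h7_count : Int := recent_hits.foldl (fun a h => if h ≥ 7 then a + 1 else a) 0
    let score := 30 + h5_count * 10 + h6_count * 15 + h7_count * 20
    min 95 score

-- ===== PORT B =====
def calculate_near_miss_score_alt (recent_hits : List Int) : Int :=
  if recent_hits.length < 5 then 50
  else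
    let score := recent_hits.foldl
      (fun s h => if h ≥ 7 then s + 45 else if h ≥ 6 then s + 25 else if h ≥ 5 then s + 10 else s) 30
    min 95 score

-- ===== PRECONDITION & SPEC =====
def Spec_calculate_near_miss_score (recent_hits : List Int) (out : Int) : Prop := out = calculate_near_miss_score_alt recent_hits
instance (recent_hits : List Int) (out : Int) : Decidable (Spec_calculate_near_miss_score recent_hits out) := by unfold Spec_calculate_near_miss_score; infer_instance

-- ===== CLAIM (what is proved, stated in full; the proofs are below) =====
def Claim_equal_calculate_near_miss_score : Prop := ∀ (recent_hits : List Int), Dom_calculate_near_miss_score recent_hits → Spec_calculate_near_miss_score recent_hits (calculate_near_miss_score recent_hits)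

-- ===== LEMMAS AND PROOFS =====

theorem pv_fuse (l : List Int) (a5 a6 a7 : Int) :
    30 + (l.foldl (fun a h => if h ≥ 5 then a + 1 else a) a5) * 10
       + (l.foldl (fun a h => if h ≥ 6 then a + 1 else a) a6) * 15
       + (l.foldl (fun a h => if h ≥ 7 then a + 1 else a) a7) * 20
    = l.foldl (fun s h => if h ≥ 7 then s + 45 else if h ≥ 6 then s + 25 else if h ≥ 5 then s + 10 else s)
        (30 + a5 * 10 + a6 * 15 + a7 * 20) := by
  induction l generalizing a5 a6 a7 with
  | nil => simp
  | cons h t ih =>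
      simp only [List.foldl_cons]
      split_ifs with h7 h6 h5 <;>
        first
          | (rw [show (30 + a5 * 10 + a6 * 15 + a7 * 20 + 45)
                   = 30 + (a5 + 1) * 10 + (a6 + 1) * 15 + (a7 + 1) * 20 by ring]; exact ih _ _ _)
          | (rw [show (30 + a5 * 10 + a6 * 15 + a7 * 20 + 25)
                   = 30 + (a5 + 1) * 10 + (a6 + 1) * 15 + a7 * 20 by ring]; exact ih _ _ _)
          | (rw [show (30 + a5 * 10 + a6 * 15 + a7 * 20 + 10)
                   = 30 + (a5 + 1) * 10 + a6 * 15 + a7 * 20 by ring]; exact ih _ _ _)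
          | exact ih _ _ _
          | omega

-- ===== VERDICT (by name: the statement is the Claim_ definition above) =====
theorem calculate_near_miss_score_spec : Claim_equal_calculate_near_miss_score := by
  intro rh _
  unfold Spec_calculate_near_miss_score calculate_near_miss_score calculate_near_miss_score_alt
  by_cases hlen : rh.length < 5
  · simp [hlen]
  · simp only [hlen, if_false]
    have := pv_fuse rh 0 0 0
    simp only [Int.zero_mul, Int.add_zero] at this
    omega
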